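-- pv_equiv track=rewrite | github.com/gaochao-s/Mesh-Silksong | silkutils/meto/ss_meto.py | judge_situation
-- ===== SOURCE A (Python) =====
-- def judge_situation(window):
--     if 0 not in window:
--         return [1, [], None]
--     if 1 not in window:
--         return [2, [], None]
--     b1=None
--     b2=None
--     b3=None
--     novalid_ind=None
--     situation=None
--     window_unique=[]
--     for i in range(len(window)):
--         if window[i]==1:
--             if not window_unique:
--                 window_unique.append(1)
--             elif window_unique[-1]==1:
--                 continue
--             else:
--                 # ...0   <-- 1
--                 if not b2:
--                     b2=i
--                     window_unique.append(1)
--                 else: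
--                     novalid_ind=i
--                     break
--         else:
--             if not window_unique:
--                 b1=-1
--                 window_unique.append(0)
--             elif window_unique[-1]==0:
--                 continue
--             else:
--                 # ...1  <-- 0
--                 window_unique.append(0)
--                 if not b1:
--                     b1=i
--                 else:
--                     b3=i
--     b_list=[]
--     if len(window_unique)==2:
--         if window_unique[0]==0:
--             situation=6
--             b_list=[b2] # 1~w-1
--         else:
--             situation=3
--             b_list=[b1] # 1~w-1
--     elif len(window_unique)==3:
--         if window_unique[0]==0:
--             situation=7
--             b_list=[b2, b3] # C w-1 ^ 2
--         else:
--             situation=4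
--             b_list=[b1, b2] # C w-1 ^ 2
--     else:
--         assert len(window_unique)==4
--         situation=5
--         b_list=[b1, b2, b3] # C w-1 ^ 3
--     if None in b_list:
--         raise Exception('[Encoder] None in b_list')
--     return [situation, b_list, novalid_ind]
-- ===== SOURCE B (Python) =====
-- def judge_situation(window):
--     if 0 not in window:
--         return [1, [], None]
--     if 1 not in window:
--         return [2, [], None]
--     # B: no run simulation -- mark each position as 1-ness, list the boundary
--     # indices where adjacent marks differ, truncate at the second 0->1 boundary,
--     # and read the answer off arithmetically: b_list IS the kept boundary list
--     # and the situation code is a linear function of its length.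
--     bits = [x == 1 for x in window]
--     trans = [i + 1 for i, (p, c) in enumerate(zip(bits, bits[1:])) if p != c]
--     cut = 3 if bits[0] else 2
--     novalid_ind = trans[cut] if cut < len(trans) else None
--     t = trans[:cut]
--     situation = (2 if bits[0] else 5) + len(t)
--     return [situation, t, novalid_ind]
-- ===== Notes on version B (the rewrite author's own statement) =====
-- stated objective: simpler
-- what changed: Instead of simulating A's stateful loop (five mutable b/novalid trackers, truthiness branches, break), B maps the window to booleans, lists the boundary indices where adjacent booleans differ via one zip-comprehension, truncates that list at the second 0->1 boundary, and reads the result off arithmetically: b_list is the kept boundary list itself and the situation code is 2 or 5 plus its length.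
import Mathlib
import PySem

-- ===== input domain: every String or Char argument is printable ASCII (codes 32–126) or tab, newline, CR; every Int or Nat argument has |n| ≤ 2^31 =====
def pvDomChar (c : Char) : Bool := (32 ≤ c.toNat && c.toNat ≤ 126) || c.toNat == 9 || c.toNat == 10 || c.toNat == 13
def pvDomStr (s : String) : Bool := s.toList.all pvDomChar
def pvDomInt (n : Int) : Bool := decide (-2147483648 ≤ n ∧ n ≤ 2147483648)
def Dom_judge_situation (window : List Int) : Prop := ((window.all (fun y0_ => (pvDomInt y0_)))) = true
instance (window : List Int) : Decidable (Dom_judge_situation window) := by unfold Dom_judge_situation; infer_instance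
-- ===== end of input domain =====

-- B replaces A's stateful tracker loop by: boolean marks, a zip-comprehension of the
-- boundary indices where adjacent marks differ, truncation at the second 0->1 boundary,
-- and an arithmetic classification from the kept list's length (objective: simpler).

-- ===== PORT A =====
-- Python truthiness of b1/b2 ('if not b1': None and 0 are falsy)
def pyTruthy (o : Option Int) : Bool :=
  match o with
  | none => false
  | some v => v != 0

-- 'for i in range(len(window)):' carrying (b1, b2, b3, novalid_ind, window_unique); break returns the state
def judgeLoop : List Int → Int → Option Int → Option Int → Option Int → Option Int → List Int →
    Option Int × Option Int × Option Int × Option Int × List Int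
  | [], _, b1, b2, b3, nov, wu => (b1, b2, b3, nov, wu)
  | x :: rest, i, b1, b2, b3, nov, wu =>
    if x == 1 then
      if wu.isEmpty then judgeLoop rest (i+1) b1 b2 b3 nov (wu ++ [1])
      else if wu.getLast? == some 1 then judgeLoop rest (i+1) b1 b2 b3 nov wu
      else if !pyTruthy b2 then judgeLoop rest (i+1) b1 (some i) b3 nov (wu ++ [1])
      else (b1, b2, b3, some i, wu)   -- novalid_ind = i; break
    else
      if wu.isEmpty then judgeLoop rest (i+1) (some (-1)) b2 b3 nov (wu ++ [0])
      else if wu.getLast? == some 0 then judgeLoop rest (i+1) b1 b2 b3 nov wu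
      else if !pyTruthy b1 then judgeLoop rest (i+1) (some i) b2 b3 nov (wu ++ [0])
      else judgeLoop rest (i+1) b1 b2 (some i) nov (wu ++ [0])

def judge_situation (window : List Int) : Int × List Int × Option Int :=
  if !(window.contains 0) then (1, [], none)
  else if !(window.contains 1) then (2, [], none)
  else
    match judgeLoop window 0 none none none none [] with
    | (b1, b2, b3, nov, wu) =>
      let sb : Int × List (Option Int) :=
        if wu.length == 2 then
          if wu.headD 0 == 0 then (6, [b2]) else (3, [b1])
        else if wu.length == 3 then
          if wu.headD 0 == 0 then (7, [b2, b3]) else (4, [b1, b2])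
        else
          (5, [b1, b2, b3])   -- 'assert len(window_unique)==4' holds here: 2 ≤ len ≤ 4 after the guards
      -- 'if None in b_list: raise' is unreachable after the guards (no element is none; proved below),
      -- so dropping none via filterMap is exact
      (sb.1, sb.2.filterMap id, nov)

-- ===== PORT B =====
def judge_situation_alt (window : List Int) : Int × List Int × Option Int :=
  if !(window.contains 0) then (1, [], none)
  else if !(window.contains 1) then (2, [], none)
  else
    let bits := window.map (fun x => x == 1)
    -- 'trans = [i + 1 for i, (p, c) in enumerate(zip(bits, bits[1:])) if p != c]'
    let trans : List Int := ((bits.zip (bits.drop 1)).zipIdx).filterMap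
        (fun pci => if pci.1.1 != pci.1.2 then some ((pci.2 : Int) + 1) else none)
    let cut : Nat := if bits.headD false then 3 else 2
    let nov : Option Int := trans[cut]?   -- 'trans[cut] if cut < len(trans) else None'
    let t := trans.take cut
    let situation : Int := (if bits.headD false then 2 else 5) + t.length
    (situation, t, nov)

-- ===== PRECONDITION & SPEC =====
def Spec_judge_situation (window : List Int) (out : Int × List Int × Option Int) : Prop := out = judge_situation_alt window
instance (window : List Int) (out : Int × List Int × Option Int) : Decidable (Spec_judge_situation window out) := by unfold Spec_judge_situation; infer_instance

-- ===== CLAIM (what is proved, stated in full; the proofs are below) =====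
def Claim_equal_judge_situation : Prop := ∀ (window : List Int), Dom_judge_situation window → Spec_judge_situation window (judge_situation window)

-- ===== LEMMAS AND PROOFS =====

-- the transition scanner: indices i where the 1-ness of window[i] differs from its predecessor's
def scanT : List Int → Int → Bool → List Int
  | [], _, _ => []
  | x :: r, i, prev =>
    if (x == 1) != prev then i :: scanT r (i+1) (x == 1)
    else scanT r (i+1) (x == 1)

-- A's b1/b2/b3 as functions of the kept transition list
def b1Of (v0 : Bool) (k : List Int) : Option Int := if v0 then k[0]? else some (-1)
def b2Of (v0 : Bool) (k : List Int) : Option Int := if v0 then k[1]? else k[0]?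
def b3Of (v0 : Bool) (k : List Int) : Option Int := if v0 then k[2]? else k[1]?
-- window_unique as a function of first 1-ness and number of kept transitions
def wuOf (v0 : Bool) (n : Nat) : List Int :=
  let a : Int := if v0 then 1 else 0
  let b : Int := 1 - a
  match n with
  | 0 => [a] | 1 => [a, b] | 2 => [a, b, a] | _ => [a, b, a, b]
-- the state A's loop ends in, as a function of the full transition list
def finalOf (v0 : Bool) (T : List Int) : Option Int × Option Int × Option Int × Option Int × List Int :=
  let cut : Nat := if v0 then 3 else 2
  let k := T.take cut
  (b1Of v0 k, b2Of v0 k, b3Of v0 k, T[cut]?, wuOf v0 k.length)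

lemma judgeLoop_eq_spec : ∀ (rest : List Int) (i : Int) (v0 : Bool) (ts : List Int),
    (ts.length ≤ if v0 then 3 else 2) → (∀ t ∈ ts, 1 ≤ t) → 1 ≤ i →
    judgeLoop rest i (b1Of v0 ts) (b2Of v0 ts) (b3Of v0 ts) none (wuOf v0 ts.length)
        = finalOf v0 (ts ++ scanT rest i (if ts.length % 2 == 0 then v0 else !v0)) := by
  intro rest
  induction rest with
  | nil =>
    intro i v0 ts hlen hpos hi
    match v0, ts, hlen with
    | false, [], _ | false, [b], _ | false, [b, c], _
    | true, [], _ | true, [b], _ | true, [b, c], _ | true, [b, c, d], _ =>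
      simp [judgeLoop, scanT, finalOf, b1Of, b2Of, b3Of, wuOf]
  | cons x rest ih =>
    intro i v0 ts hlen hpos hi
    have hnext : ∀ (v0' : Bool) (ts' : List Int),
        (ts'.length ≤ if v0' then 3 else 2) → (∀ t ∈ ts', 1 ≤ t) →
        judgeLoop rest (i+1) (b1Of v0' ts') (b2Of v0' ts') (b3Of v0' ts') none (wuOf v0' ts'.length)
            = finalOf v0' (ts' ++ scanT rest (i+1) (if ts'.length % 2 == 0 then v0' else !v0')) :=
      fun v0' ts' h1 h2 => ih (i+1) v0' ts' h1 h2 (by omega)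
    match v0, ts, hlen with
    | false, [], _ =>
      by_cases hx : x = 1
      · subst hx
        have k := hnext false [i] (by simp) (by intro t ht; simp at ht; omega)
        simpa [judgeLoop, scanT, b1Of, b2Of, b3Of, wuOf, pyTruthy] using k
      · have hxb : (x == 1) = false := by simp [hx]
        have k := hnext false [] (by simp) (by simp)
        simpa [judgeLoop, scanT, b1Of, b2Of, b3Of, wuOf, hxb, hx] using k
    | false, [b], _ =>
      have hb : (1:Int) ≤ b := hpos b (by simp)
      have hb0 : (b:Int) ≠ 0 := by omega
      by_cases hx : x = 1
      · subst hx
        have k := hnext false [b] (by simp) hpos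
        simpa [judgeLoop, scanT, b1Of, b2Of, b3Of, wuOf, pyTruthy] using k
      · have hxb : (x == 1) = false := by simp [hx]
        have k := hnext false [b, i] (by simp) (by intro t ht; simp at ht; rcases ht with rfl | rfl <;> omega)
        simpa [judgeLoop, scanT, b1Of, b2Of, b3Of, wuOf, pyTruthy, hxb, hx] using k
    | false, [b, c], _ =>
      have hb : (1:Int) ≤ b := hpos b (by simp)
      have hb0 : (b:Int) ≠ 0 := by omega
      by_cases hx : x = 1
      · -- second 0->1 transition: break
        subst hx
        simp [judgeLoop, scanT, finalOf, b1Of, b2Of, b3Of, wuOf, pyTruthy, hb0]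
      · have hxb : (x == 1) = false := by simp [hx]
        have k := hnext false [b, c] (by simp) hpos
        simpa [judgeLoop, scanT, b1Of, b2Of, b3Of, wuOf, pyTruthy, hxb, hx] using k
    | true, [], _ =>
      by_cases hx : x = 1
      · subst hx
        have k := hnext true [] (by simp) (by simp)
        simpa [judgeLoop, scanT, b1Of, b2Of, b3Of, wuOf] using k
      · have hxb : (x == 1) = false := by simp [hx]
        have k := hnext true [i] (by simp) (by intro t ht; simp at ht; omega)
        simpa [judgeLoop, scanT, b1Of, b2Of, b3Of, wuOf, pyTruthy, hxb, hx] using k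
    | true, [b], _ =>
      have hb : (1:Int) ≤ b := hpos b (by simp)
      have hb0 : (b:Int) ≠ 0 := by omega
      by_cases hx : x = 1
      · subst hx
        have k := hnext true [b, i] (by simp) (by intro t ht; simp at ht; rcases ht with rfl | rfl <;> omega)
        simpa [judgeLoop, scanT, b1Of, b2Of, b3Of, wuOf, pyTruthy] using k
      · have hxb : (x == 1) = false := by simp [hx]
        have k := hnext true [b] (by simp) hpos
        simpa [judgeLoop, scanT, b1Of, b2Of, b3Of, wuOf, pyTruthy, hxb, hx] using k
    | true, [b, c], _ =>
      have hb : (1:Int) ≤ b := hpos b (by simp)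
      have hc : (1:Int) ≤ c := hpos c (by simp)
      have hb0 : (b:Int) ≠ 0 := by omega
      by_cases hx : x = 1
      · subst hx
        have k := hnext true [b, c] (by simp) hpos
        simpa [judgeLoop, scanT, b1Of, b2Of, b3Of, wuOf, pyTruthy] using k
      · have hxb : (x == 1) = false := by simp [hx]
        have k := hnext true [b, c, i] (by simp)
          (by intro t ht; simp at ht; rcases ht with rfl | rfl | rfl <;> omega)
        simpa [judgeLoop, scanT, b1Of, b2Of, b3Of, wuOf, pyTruthy, hxb, hx, hb0] using k
    | true, [b, c, d], _ =>
      have hc : (1:Int) ≤ c := hpos c (by simp)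
      have hc0 : (c:Int) ≠ 0 := by omega
      by_cases hx : x = 1
      · -- second 0->1 transition: break
        subst hx
        simp [judgeLoop, scanT, finalOf, b1Of, b2Of, b3Of, wuOf, pyTruthy, hc0]
      · have hxb : (x == 1) = false := by simp [hx]
        have k := hnext true [b, c, d] (by simp) hpos
        simpa [judgeLoop, scanT, b1Of, b2Of, b3Of, wuOf, pyTruthy, hxb, hx] using k

-- first iteration of A's loop: establishes the one-element window_unique state
lemma judgeLoop_start (x : Int) (ws : List Int) :
    judgeLoop (x :: ws) 0 none none none none []
        = finalOf (x == 1) (scanT ws 1 (x == 1)) := by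
  by_cases hx : x = 1
  · subst hx
    have k := judgeLoop_eq_spec ws 1 true [] (by simp) (by simp) (le_refl 1)
    simpa [judgeLoop, b1Of, b2Of, b3Of, wuOf] using k
  · have hxb : (x == 1) = false := by simp [hx]
    have k := judgeLoop_eq_spec ws 1 false [] (by simp) (by simp) (le_refl 1)
    rw [hxb]
    simpa [judgeLoop, b1Of, b2Of, b3Of, wuOf, hxb, hx] using k

-- B's zip-comprehension computes the transition scanner
lemma trans_eq_scan : ∀ (ws : List Int) (prev : Bool) (k : Nat),
    ((((prev :: ws.map (fun x => x == 1)).zip (ws.map (fun x => x == 1))).zipIdx k).filterMap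
        (fun pci => if pci.1.1 != pci.1.2 then some ((pci.2 : Int) + 1) else none))
      = scanT ws ((k : Int) + 1) prev := by
  intro ws
  induction ws with
  | nil => intro prev k; simp [scanT]
  | cons y r ih =>
    intro prev k
    have hrec := ih (y == 1) (k + 1)
    have hcast : ((k + 1 : Nat) : Int) + 1 = (k : Int) + 1 + 1 := by push_cast; ring
    rw [hcast] at hrec
    by_cases hy : prev = (y == 1)
    · subst hy
      simp only [List.map_cons, List.zip_cons_cons, List.zipIdx_cons, List.filterMap_cons,
        bne_self_eq_false, Bool.false_eq_true, if_false]
      rw [hrec]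
      simp [scanT]
    · have hne : ((y == 1) != prev) = true := by
        cases prev <;> cases h : (y == 1) <;> simp_all
      have hne' : (prev != (y == 1)) = true := by
        cases prev <;> cases h : (y == 1) <;> simp_all
      simp only [List.map_cons, List.zip_cons_cons, List.zipIdx_cons, List.filterMap_cons, hne',
        if_true]
      rw [hrec]
      simp only [scanT, hne, if_true]

-- if the scanner finds nothing, every element has the same 1-ness as prev
lemma scanT_nil_all : ∀ (ws : List Int) (i : Int) (prev : Bool),
    scanT ws i prev = [] → ∀ y ∈ ws, (y == 1) = prev := by
  intro ws
  induction ws with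
  | nil => intro i prev _ y hy; cases hy
  | cons x r ih =>
    intro i prev h y hy
    by_cases hx : (x == 1) = prev
    · rw [← hx] at h ⊢
      simp only [scanT, bne_self_eq_false, Bool.false_eq_true, if_false] at h
      rcases List.mem_cons.mp hy with rfl | hy'
      · rfl
      · exact ih (i+1) (x == 1) h y hy'
    · exfalso
      have hne : ((x == 1) != prev) = true := by
        cases prev <;> cases h' : (x == 1) <;> simp_all
      simp [scanT, hne] at h

-- ===== VERDICT (by name: the statement is the Claim_ definition above) =====
theorem judge_situation_spec : Claim_equal_judge_situation := by
  intro window _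
  unfold Spec_judge_situation judge_situation judge_situation_alt
  by_cases h0 : window.contains 0
  swap
  · have h0m : (0 : Int) ∉ window := by simpa using h0
    simp [h0m]
  by_cases h1 : window.contains 1
  swap
  · have h1m : (1 : Int) ∉ window := by simpa using h1
    simp [h1m]
  simp only [h0, h1, Bool.not_true, Bool.false_eq_true, if_false]
  have h0' : (0 : Int) ∈ window := by simpa using h0
  have h1' : (1 : Int) ∈ window := by simpa using h1
  obtain ⟨x, ws, rfl⟩ : ∃ x ws, window = x :: ws := by
    cases window with
    | nil => cases h0'
    | cons x ws => exact ⟨x, ws, rfl⟩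
  rw [judgeLoop_start]
  have hbr : ((((x :: ws).map (fun x => x == 1)).zip (((x :: ws).map (fun x => x == 1)).drop 1)).zipIdx.filterMap
        (fun pci => if pci.1.1 != pci.1.2 then some ((pci.2 : Int) + 1) else none))
      = scanT ws 1 (x == 1) := by
    have := trans_eq_scan ws (x == 1) 0
    simpa using this
  simp only [List.map_cons, List.drop_succ_cons, List.drop_zero] at hbr ⊢
  rw [hbr]
  have hT : scanT ws 1 (x == 1) ≠ [] := by
    intro hnil
    have hall := scanT_nil_all ws 1 (x == 1) hnil
    by_cases hx : x = 1
    · have h0ws : (0 : Int) ∈ ws := by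
        rcases List.mem_cons.mp h0' with h | h
        · exfalso; omega
        · exact h
      have hc := hall 0 h0ws
      simp [hx] at hc
    · have h1ws : (1 : Int) ∈ ws := by
        rcases List.mem_cons.mp h1' with h | h
        · exact absurd h.symm hx
        · exact h
      have hc := hall 1 h1ws
      simp [hx] at hc
  rcases hS : scanT ws 1 (x == 1) with _ | ⟨b, T'⟩
  · exact absurd hS hT
  by_cases hx : x = 1
  · subst hx
    match T' with
    | [] => simp [finalOf, b1Of, b2Of, b3Of, wuOf]
    | [c] => simp [finalOf, b1Of, b2Of, b3Of, wuOf]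
    | c :: d :: R => simp [finalOf, b1Of, b2Of, b3Of, wuOf]
  · have hxb : (x == 1) = false := by simp [hx]
    match T' with
    | [] => simp [finalOf, b1Of, b2Of, b3Of, wuOf, hxb]
    | c :: R => simp [finalOf, b1Of, b2Of, b3Of, wuOf, hxb]
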